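-- pv_equiv track=rewrite | github.com/CorralNicolas/Algo-1-de-Nicolas | Parcial.py | torneo_de_gallinas
-- ===== SOURCE A (Python) =====
-- def torneo_de_gallinas(estrategias:dict[(str,str)])-> dict[(str,str)]:
--     diccionario_aux:dict[str,int] = dict()
--     contador:int = 0
--     for persona in estrategias.keys():
--         for persona2 in estrategias.keys():
--             if persona != persona2:
--                 if estrategias[persona] == "me desvio siempre" and estrategias[persona2] == "me desvio siempre":
--                     contador += (-10)
--                 elif estrategias[persona] == "me desvio siempre" and estrategias[persona2] == "me la banco y no me desvio":
--                     contador += (-15)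
--                 elif estrategias[persona] == "me la banco y no me desvio" and estrategias[persona2] == "me desvio siempre":
--                     contador += 10
--                 elif estrategias[persona] == "me la banco y no me desvio" and estrategias[persona2] == "me la banco y no me desvio":
--                     contador += (-5)
--         diccionario_aux[persona] = contador
--         contador = 0
--     return diccionario_aux
-- ===== SOURCE B (Python) =====
-- def torneo_de_gallinas(estrategias: dict[(str, str)]) -> dict[(str, str)]:
--     # One pass to count strategies, then each person's score in O(1).
--     nd = sum(1 for v in estrategias.values() if v == "me desvio siempre")
--     nb = sum(1 for v in estrategias.values() if v == "me la banco y no me desvio")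
--     resultado: dict[str, int] = dict()
--     for persona, s in estrategias.items():
--         if s == "me desvio siempre":
--             resultado[persona] = -10 * (nd - 1) + (-15) * nb
--         elif s == "me la banco y no me desvio":
--             resultado[persona] = 10 * nd + (-5) * (nb - 1)
--         else:
--             resultado[persona] = 0
--     return resultado
-- ===== Notes on version B (the rewrite author's own statement) =====
-- stated objective: faster
-- what changed: B counts the two strategies once and computes every person's score by a closed-form O(1) formula instead of A's inner scan over all other persons.
import Mathlib
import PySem

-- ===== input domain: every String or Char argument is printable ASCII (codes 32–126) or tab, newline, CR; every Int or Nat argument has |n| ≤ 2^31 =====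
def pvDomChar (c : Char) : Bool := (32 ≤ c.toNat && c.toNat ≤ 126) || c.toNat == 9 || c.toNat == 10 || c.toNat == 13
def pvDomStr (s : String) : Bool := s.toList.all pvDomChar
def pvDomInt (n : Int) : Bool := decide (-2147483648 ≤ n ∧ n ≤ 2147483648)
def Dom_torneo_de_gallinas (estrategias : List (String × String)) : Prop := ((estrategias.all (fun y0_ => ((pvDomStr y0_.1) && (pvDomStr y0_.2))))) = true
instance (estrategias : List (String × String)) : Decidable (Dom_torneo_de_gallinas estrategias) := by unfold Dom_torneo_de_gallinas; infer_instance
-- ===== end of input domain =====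

-- B replaces A's quadratic nested scan by one counting pass and a closed-form per-person score (faster, asymptotic).


-- ===== PORT A =====
-- Python dict lookup estrategias[persona] (first match; under Pre_ the key is always present, so no KeyError)
def pvLk (l : List (String × String)) (k : String) : String :=
  match l with
  | [] => ""
  | (a, b) :: t => if a = k then b else pvLk t k

-- inner 'for persona2 in estrategias.keys(): …' loop accumulating contador from 0
def pvInner (l : List (String × String)) (persona : String) : Int :=
  l.foldl (fun contador pr =>
    if persona ≠ pr.1 then
      if pvLk l persona = "me desvio siempre" ∧ pvLk l pr.1 = "me desvio siempre" then contador + (-10)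
      else if pvLk l persona = "me desvio siempre" ∧ pvLk l pr.1 = "me la banco y no me desvio" then contador + (-15)
      else if pvLk l persona = "me la banco y no me desvio" ∧ pvLk l pr.1 = "me desvio siempre" then contador + 10
      else if pvLk l persona = "me la banco y no me desvio" ∧ pvLk l pr.1 = "me la banco y no me desvio" then contador + (-5)
      else contador
    else contador) 0

-- outer loop: diccionario_aux[persona] = contador (keys are distinct under Pre_, so each assignment appends)
def torneo_de_gallinas (estrategias : List (String × String)) : List (String × Int) :=
  estrategias.foldl (fun aux pr => aux ++ [(pr.1, pvInner estrategias pr.1)]) []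

-- ===== PORT B =====
def torneo_de_gallinas_alt (estrategias : List (String × String)) : List (String × Int) :=
  let nd : Int := (estrategias.countP (fun pr => pr.2 = "me desvio siempre") : Int)
  let nb : Int := (estrategias.countP (fun pr => pr.2 = "me la banco y no me desvio") : Int)
  estrategias.map (fun pr =>
    (pr.1, if pr.2 = "me desvio siempre" then -10 * (nd - 1) + (-15) * nb
           else if pr.2 = "me la banco y no me desvio" then 10 * nd + (-5) * (nb - 1)
           else 0))

-- ===== PRECONDITION & SPEC =====
-- Pre_ excludes association lists with duplicate keys: they do not correspond to any Python dict input
-- (a Python dict collapses duplicates), so A's behaviour there is nobody's to match.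
def Pre_torneo_de_gallinas (estrategias : List (String × String)) : Prop :=
  (estrategias.map Prod.fst).Nodup
instance (estrategias : List (String × String)) : Decidable (Pre_torneo_de_gallinas estrategias) := by unfold Pre_torneo_de_gallinas; infer_instance

def pvWitness_torneo_de_gallinas : (List (String × String)) :=
  [("ana", "me desvio siempre"), ("bob", "me la banco y no me desvio"), ("eva", "otra cosa")]

def Spec_torneo_de_gallinas (estrategias : List (String × String)) (out : List (String × Int)) : Prop := out = torneo_de_gallinas_alt estrategias
instance (estrategias : List (String × String)) (out : List (String × Int)) : Decidable (Spec_torneo_de_gallinas estrategias out) := by unfold Spec_torneo_de_gallinas; infer_instance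

-- ===== CLAIM (what is proved, stated in full; the proofs are below) =====
def Claim_equal_torneo_de_gallinas : Prop := ∀ (estrategias : List (String × String)), Dom_torneo_de_gallinas estrategias → Pre_torneo_de_gallinas estrategias → Spec_torneo_de_gallinas estrategias (torneo_de_gallinas estrategias)

-- ===== LEMMAS AND PROOFS =====

-- the payoff row of A's branch table, split by the opponent's strategy
def payD (s : String) : Int := if s = "me desvio siempre" then -10 else if s = "me la banco y no me desvio" then 10 else 0
def payB (s : String) : Int := if s = "me desvio siempre" then -15 else if s = "me la banco y no me desvio" then -5 else 0

-- with nodup keys, dict lookup of a present pair returns its value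
theorem pvLk_eq {l : List (String × String)} {p s : String}
    (hnd : (l.map Prod.fst).Nodup) (hm : (p, s) ∈ l) : pvLk l p = s := by
  induction l with
  | nil => cases hm
  | cons hd t ih =>
    obtain ⟨a, b⟩ := hd
    simp only [List.map_cons, List.nodup_cons] at hnd
    rw [List.mem_cons] at hm
    rcases hm with heq | hm
    · cases heq; simp [pvLk]
    · have hpm : p ∈ List.map Prod.fst t := List.mem_map.mpr ⟨(p, s), hm, rfl⟩
      have hne : a ≠ p := fun h => hnd.1 (h ▸ hpm)
      simp [pvLk, hne, ih hnd.2 hm]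

-- A's inner loop, with lookups resolved, is a sum of per-opponent payoffs
theorem pvInner_eq_sum {l : List (String × String)} (hnd : (l.map Prod.fst).Nodup)
    {p s : String} (hm : (p, s) ∈ l) :
    pvInner l p = (l.map (fun pr => if pr.1 ≠ p then
      (if pr.2 = "me desvio siempre" then payD s
       else if pr.2 = "me la banco y no me desvio" then payB s else 0) else 0)).sum := by
  have hs : pvLk l p = s := pvLk_eq hnd hm
  unfold pvInner
  have hcong := PySem.List.foldl_congr_mem (l := l) (init := (0 : Int))
    (f := fun contador pr =>
      if p ≠ pr.1 then
        if pvLk l p = "me desvio siempre" ∧ pvLk l pr.1 = "me desvio siempre" then contador + (-10)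
        else if pvLk l p = "me desvio siempre" ∧ pvLk l pr.1 = "me la banco y no me desvio" then contador + (-15)
        else if pvLk l p = "me la banco y no me desvio" ∧ pvLk l pr.1 = "me desvio siempre" then contador + 10
        else if pvLk l p = "me la banco y no me desvio" ∧ pvLk l pr.1 = "me la banco y no me desvio" then contador + (-5)
        else contador
      else contador)
    (g := fun contador pr =>
    contador + (if pr.1 ≠ p then
      (if pr.2 = "me desvio siempre" then payD s
       else if pr.2 = "me la banco y no me desvio" then payB s else 0) else 0))
    (by
      intro c pr hpr
      have hv : pvLk l pr.1 = pr.2 := pvLk_eq hnd (by exact (Prod.mk.eta (p := pr)) ▸ hpr)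
      simp only [hs, hv]
      by_cases h1 : p = pr.1
      · simp [h1]
      · have h1' : pr.1 ≠ p := fun h => h1 h.symm
        simp only [h1, h1', ne_eq, not_false_eq_true, if_true]
        by_cases hD : s = "me desvio siempre" <;>
          by_cases hB : s = "me la banco y no me desvio" <;>
          by_cases hD2 : pr.2 = "me desvio siempre" <;>
          by_cases hB2 : pr.2 = "me la banco y no me desvio" <;>
          simp_all [payD, payB])
  rw [hcong, PySem.List.foldl_add]
  simp

-- counting opponents: the full count splits into self and the rest
theorem countP_split {l : List (String × String)} (hnd : (l.map Prod.fst).Nodup)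
    {p s : String} (hm : (p, s) ∈ l) (q : String) :
    (l.countP (fun pr => pr.2 = q) : Int)
      = (l.countP (fun pr => decide (pr.1 ≠ p) && decide (pr.2 = q)) : Int)
        + (if s = q then 1 else 0) := by
  induction l with
  | nil => cases hm
  | cons hd t ih =>
    obtain ⟨a, b⟩ := hd
    simp only [List.map_cons, List.nodup_cons] at hnd
    rw [List.mem_cons] at hm
    rcases hm with heq | hm
    · cases heq
      have hrest : ∀ pr ∈ t, (decide (pr.2 = q) = true ↔ (decide (pr.1 ≠ p) && decide (pr.2 = q)) = true) := by
        intro pr hpr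
        have hpm : pr.1 ∈ List.map Prod.fst t := List.mem_map.mpr ⟨pr, hpr, rfl⟩
        have hne : pr.1 ≠ p := fun h => hnd.1 (h ▸ hpm)
        simp [hne]
      rw [List.countP_cons, List.countP_cons, List.countP_congr hrest]
      by_cases hq : s = q <;> simp [hq]
    · have hpm : p ∈ List.map Prod.fst t := List.mem_map.mpr ⟨(p, s), hm, rfl⟩
      have hne : a ≠ p := fun h => hnd.1 (h ▸ hpm)
      rw [List.countP_cons, List.countP_cons]
      push_cast
      rw [ih hnd.2 hm]
      by_cases hq : b = q <;> simp [hq, hne]; push_cast; ring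

-- the per-opponent payoff sum is payD·(#deviators among others) + payB·(#bancers among others)
theorem sum_pay (l : List (String × String)) (p : String) (cD cB : Int) :
    (l.map (fun pr => if pr.1 ≠ p then
      (if pr.2 = "me desvio siempre" then cD
       else if pr.2 = "me la banco y no me desvio" then cB else 0) else 0)).sum
    = cD * (l.countP (fun pr => decide (pr.1 ≠ p) && decide (pr.2 = "me desvio siempre")) : Int)
      + cB * (l.countP (fun pr => decide (pr.1 ≠ p) && decide (pr.2 = "me la banco y no me desvio")) : Int) := by
  induction l with
  | nil => simp
  | cons hd t ih =>
    rw [List.map_cons, List.sum_cons, List.countP_cons, List.countP_cons]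
    push_cast
    rw [ih]
    by_cases h1 : hd.1 ≠ p <;>
      by_cases hD : hd.2 = "me desvio siempre" <;>
      by_cases hB : hd.2 = "me la banco y no me desvio" <;>
      simp [h1, hD, hB] <;> ring

-- ===== VERDICT (by name: the statement is the Claim_ definition above) =====
theorem torneo_de_gallinas_spec : Claim_equal_torneo_de_gallinas := by
  intro l _ hpre
  unfold Spec_torneo_de_gallinas torneo_de_gallinas torneo_de_gallinas_alt
  rw [PySem.List.foldl_append_singleton_eq_map]
  simp only [List.nil_append]
  apply List.map_congr_left
  intro pr hpr
  have hm : (pr.1, pr.2) ∈ l := (Prod.mk.eta (p := pr)) ▸ hpr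
  rw [pvInner_eq_sum hpre hm, sum_pay]
  rw [countP_split hpre hm "me desvio siempre", countP_split hpre hm "me la banco y no me desvio"] 
  have hDB : ("me desvio siempre" : String) ≠ "me la banco y no me desvio" := by decide
  by_cases hD : pr.2 = "me desvio siempre" <;>
    by_cases hB : pr.2 = "me la banco y no me desvio" <;>
    simp_all [payD, payB]
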